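-- pv_equiv track=rewrite | github.com/GIS-sys/AoC2024 | 07b/main.py | calc
-- ===== SOURCE A (Python) =====
-- def calc(values: list[int], signs: list[int]) -> int:
--     predicted_result = values[0]
--     for sign, value in zip(signs, values[1:]):
--         if sign == 0:
--             predicted_result += value
--         elif sign == 1:
--             predicted_result *= value
--         else:
--             predicted_result = int(str(predicted_result) + str(value))
--     return predicted_result
-- ===== SOURCE B (Python) =====
-- def _eval(values, signs, k):
--     # value of the expression over values[0..k] with operators signs[0..k-1]
--     if k <= 0:
--         return values[0]
--     prev = _eval(values, signs, k - 1)
--     s, v = signs[k - 1], values[k]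
--     if s == 0:
--         return prev + v
--     if s == 1:
--         return prev * v
--     return int(str(prev) + str(v))
--
--
-- def calc(values, signs):
--     return _eval(values, signs, min(len(signs), len(values) - 1))
-- ===== Notes on version B (the rewrite author's own statement) =====
-- stated objective: alternative
-- what changed: Replaces A's forward mutating loop over zip(signs, values[1:]) with a recursive descent: _eval(values, signs, k) recursively evaluates the prefix ending at index k by computing the k-1 prefix first and then applying the k-th operator, peeling pairs from the end instead of iterating from the front.
-- outside the precondition, e.g. on calc([], []): A raises IndexError, B raises IndexError; on calc([1, -2], [5]): A raises ValueError, B raises ValueError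
import Mathlib
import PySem

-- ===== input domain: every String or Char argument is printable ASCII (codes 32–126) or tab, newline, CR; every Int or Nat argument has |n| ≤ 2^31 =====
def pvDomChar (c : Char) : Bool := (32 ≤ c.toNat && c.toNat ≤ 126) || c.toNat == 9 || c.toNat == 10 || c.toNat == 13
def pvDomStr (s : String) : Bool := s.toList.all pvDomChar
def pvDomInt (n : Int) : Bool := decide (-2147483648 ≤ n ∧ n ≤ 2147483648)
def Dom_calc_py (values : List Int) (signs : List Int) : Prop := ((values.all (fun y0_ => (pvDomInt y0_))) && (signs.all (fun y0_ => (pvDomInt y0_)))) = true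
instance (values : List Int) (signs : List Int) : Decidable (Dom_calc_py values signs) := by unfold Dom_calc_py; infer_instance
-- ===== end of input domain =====

-- B replaces A's forward mutating loop over zip(signs, values[1:]) by a recursive descent
-- _eval(values, signs, k) that evaluates the prefix ending at index k from the end inward;
-- an alternative decomposition of the same O(n) computation, not claimed faster.

-- ===== PORT A =====
-- the for-loop of A over zip(signs, values[1:]); Option threads the ValueError of
-- int(str(predicted_result) + str(value)) (none exactly where Python raises)
def pvCalcALoop (acc : Int) : List (Int × Int) → Option Int
  | [] => some acc
  | (sign, value) :: rest =>
    if sign = 0 then pvCalcALoop (acc + value) rest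
    else if sign = 1 then pvCalcALoop (acc * value) rest
    else
      match PySem.Int.ofChars? (PySem.Int.toChars acc ++ PySem.Int.toChars value) with
      | none => none
      | some acc' => pvCalcALoop acc' rest

def calc_py (values : List Int) (signs : List Int) : Int :=
  match PySem.List.pyGet? values 0 with
  | none => 0   -- values[0]: IndexError, excluded by Pre_
  | some first =>
    (pvCalcALoop first (signs.zip (PySem.List.slice values (some 1) none))).getD 0

-- ===== PORT B =====
-- _eval(values, signs, k): recursive; Option threads IndexError/ValueError (excluded by Pre_)
def pvEvalB (values : List Int) (signs : List Int) : Nat → Option Int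
  | 0 => PySem.List.pyGet? values 0
  | (k+1) =>
    (pvEvalB values signs k).bind fun prev =>
      match PySem.List.pyGet? signs (k : Int), PySem.List.pyGet? values ((k : Int) + 1) with
      | some s, some v =>
        if s = 0 then some (prev + v)
        else if s = 1 then some (prev * v)
        else PySem.Int.ofChars? (PySem.Int.toChars prev ++ PySem.Int.toChars v)
      | _, _ => none

def calc_py_alt (values : List Int) (signs : List Int) : Int :=
  -- min(len(signs), len(values) - 1); Python's k <= 0 base case makes a negative k act as 0
  (pvEvalB values signs (min (signs.length : Int) ((values.length : Int) - 1)).toNat).getD 0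

-- ===== PRECONDITION & SPEC =====
-- Pre_ excludes exactly the inputs where the Python A raises: empty values (IndexError on
-- values[0]) and a negative value reaching the concat branch (int("…-…") is a ValueError).
def Pre_calc_py (values : List Int) (signs : List Int) : Prop :=
  values ≠ [] ∧
    ∀ p ∈ signs.zip (PySem.List.slice values (some 1) none),
      (p.1 ≠ 0 ∧ p.1 ≠ 1) → 0 ≤ p.2
instance (values : List Int) (signs : List Int) : Decidable (Pre_calc_py values signs) := by
  unfold Pre_calc_py; infer_instance

def pvWitness_calc_py : List Int × List Int := ([81, 40, 27], [2, 0])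

def Spec_calc_py (values : List Int) (signs : List Int) (out : Int) : Prop := out = calc_py_alt values signs
instance (values : List Int) (signs : List Int) (out : Int) : Decidable (Spec_calc_py values signs out) := by unfold Spec_calc_py; infer_instance

-- ===== CLAIM =====
def Claim_equal_calc_py : Prop := ∀ (values : List Int) (signs : List Int), Dom_calc_py values signs → Pre_calc_py values signs → Spec_calc_py values signs (calc_py values signs)

-- ===== LEMMAS AND PROOFS =====

-- one operator application (shared shape of A's loop body and B's step)
def pvStepPair (a : Int) (p : Int × Int) : Option Int :=
  if p.1 = 0 then some (a + p.2)
  else if p.1 = 1 then some (a * p.2)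
  else PySem.Int.ofChars? (PySem.Int.toChars a ++ PySem.Int.toChars p.2)

theorem pvCalcALoop_append_one (l : List (Int × Int)) (p : Int × Int) (acc : Int) :
    pvCalcALoop acc (l ++ [p]) = (pvCalcALoop acc l).bind (fun a => pvStepPair a p) := by
  induction l generalizing acc with
  | nil =>
    obtain ⟨s, v⟩ := p
    simp only [List.nil_append, pvCalcALoop, pvStepPair, Option.bind]
    split_ifs with h0 h1
    · rfl
    · rfl
    · cases h : PySem.Int.ofChars? (PySem.Int.toChars acc ++ PySem.Int.toChars v) <;> rfl
  | cons q rest ih =>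
    obtain ⟨s, v⟩ := q
    simp only [List.cons_append, pvCalcALoop]
    split_ifs with h0 h1
    · exact ih (acc + v)
    · exact ih (acc * v)
    · cases h : PySem.Int.ofChars? (PySem.Int.toChars acc ++ PySem.Int.toChars v) with
      | none => rfl
      | some a' => exact ih a'

theorem pvEvalB_eq_loop (values signs : List Int) (k : Nat)
    (hk : k ≤ (signs.zip (PySem.List.slice values (some 1) none)).length) :
    pvEvalB values signs k =
      (PySem.List.pyGet? values 0).bind
        (fun f => pvCalcALoop f ((signs.zip (PySem.List.slice values (some 1) none)).take k)) := by
  induction k with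
  | zero =>
    simp [pvEvalB, pvCalcALoop]
  | succ k ih =>
    set pairs := signs.zip (PySem.List.slice values (some 1) none) with hpairs
    have hklt : k < pairs.length := by omega
    have hlen : pairs.length = min signs.length (values.length - 1) := by
      simp [hpairs, PySem.List.slice_from_one, List.length_zip, List.length_tail]
    have hks : k < signs.length := by omega
    have hkv : k + 1 < values.length := by omega
    have hget : pairs[k] = (signs[k], values[k + 1]) := by
      simp [hpairs, PySem.List.slice_from_one, List.getElem_zip, List.getElem_tail]
    have htake : pairs.take (k + 1) = pairs.take k ++ [pairs[k]] := by
      rw [List.take_add_one, List.getElem?_eq_getElem hklt]; rfl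
    have hs : PySem.List.pyGet? signs (k : Int) = some signs[k] := by
      simp [PySem.List.pyGet?_natCast, List.getElem?_eq_getElem hks]
    have hv : PySem.List.pyGet? values ((k : Int) + 1) = some values[k + 1] := by
      rw [show ((k : Int) + 1) = ((k + 1 : Nat) : Int) from by push_cast; ring,
        PySem.List.pyGet?_natCast, List.getElem?_eq_getElem hkv]
    rw [pvEvalB, ih (by omega), htake]
    cases h0 : PySem.List.pyGet? values 0 with
    | none => rfl
    | some f =>
      simp only [Option.bind_some, pvCalcALoop_append_one, hs, hv]
      cases hloop : pvCalcALoop f (pairs.take k) with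
      | none => rfl
      | some a =>
        simp [pvStepPair, hget]

-- ===== VERDICT =====
theorem calc_py_spec : Claim_equal_calc_py := by
  intro values signs _ hpre
  unfold Spec_calc_py calc_py calc_py_alt
  cases h0 : PySem.List.pyGet? values 0 with
  | none =>
    have hnil : values = [] := by
      rw [show (0 : Int) = ((0 : Nat) : Int) from rfl, PySem.List.pyGet?_natCast] at h0
      cases values with
      | nil => rfl
      | cons a l => simp at h0
    exact absurd hnil hpre.1
  | some first =>
    have hne : values ≠ [] := hpre.1
    have hvpos : 1 ≤ values.length := by
      cases values with
      | nil => exact absurd rfl hne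
      | cons a l => simp
    set pairs := signs.zip (PySem.List.slice values (some 1) none) with hpairs
    have hlen : pairs.length = min signs.length (values.length - 1) := by
      simp [hpairs, PySem.List.slice_from_one, List.length_zip, List.length_tail]
    have hk : (min (signs.length : Int) ((values.length : Int) - 1)).toNat = pairs.length := by
      omega
    rw [hk, pvEvalB_eq_loop values signs pairs.length (le_refl _), h0]
    rw [← hpairs, Option.bind_some, List.take_length]
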